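-- pv_equiv track=rewrite | github.com/SACGF/variantgrid | library/utils/text_utils.py | pretty_label
-- ===== SOURCE A (Python) =====
-- def pretty_label(label: str) -> str:
--     label = label.replace('_', ' ')
--     tidied = ''
--     last_space = True
--     for char in label:
--         if last_space:
--             char = char.upper()
--             last_space = False
--         if char == ' ':
--             last_space = True
--         tidied += char
--     return tidied
-- ===== SOURCE B (Python) =====
-- def pretty_label(label: str) -> str:
--     words = label.replace('_', ' ').split(' ')
--     return ' '.join(w[:1].upper() + w[1:] for w in words)
-- ===== Notes on version B (the rewrite author's own statement) =====
-- stated objective: idiomatic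
-- what changed: Replaces A's stateful character-by-character scan with a last_space flag and string += by a split-on-space / capitalize-first-char-of-each-word / rejoin decomposition (empty segments are kept and only the first character of each word is uppercased).
import Mathlib
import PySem

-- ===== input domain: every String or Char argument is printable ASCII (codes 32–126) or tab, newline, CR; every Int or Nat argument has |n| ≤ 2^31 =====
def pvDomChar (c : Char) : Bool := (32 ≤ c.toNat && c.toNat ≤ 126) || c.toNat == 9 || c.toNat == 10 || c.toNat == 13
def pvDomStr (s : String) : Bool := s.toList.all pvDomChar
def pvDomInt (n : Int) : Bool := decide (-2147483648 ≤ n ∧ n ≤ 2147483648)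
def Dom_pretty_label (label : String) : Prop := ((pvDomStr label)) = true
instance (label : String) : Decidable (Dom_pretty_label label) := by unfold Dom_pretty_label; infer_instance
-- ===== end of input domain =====

-- B replaces A's stateful character-by-character scan (last_space flag, string +=)
-- by the idiomatic split-on-space / capitalize-first-char-of-each-word / rejoin decomposition.


-- ===== PORT A =====
-- the body of A's for-loop: one character step on the state (tidied, last_space)
def pretty_label_step (st : List Char × Bool) (char : Char) : List Char × Bool :=
  let (char, last_space) :=
    if st.2 then (PySem.Chars.upperChar char, false) else (char, st.2)
  let last_space := if char = ' ' then true else last_space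
  (st.1 ++ [char], last_space)

def pretty_label (label : String) : String :=
  let label2 := PySem.Str.replace label "_" " "
  let r := label2.toList.foldl pretty_label_step (([] : List Char), true)
  String.ofList r.1

-- ===== PORT B =====
def pretty_label_alt (label : String) : String :=
  let s := (PySem.Str.replace label "_" " ").toList
  let words := PySem.Chars.splitOn s [' ']
  String.ofList (PySem.Chars.join [' ']
    (words.map (fun w =>
      PySem.Chars.upper (PySem.Chars.slice w none (some 1)) ++
        PySem.Chars.slice w (some 1) none)))

-- ===== PRECONDITION & SPEC =====
def Spec_pretty_label (label : String) (out : String) : Prop := out = pretty_label_alt label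
instance (label : String) (out : String) : Decidable (Spec_pretty_label label out) := by unfold Spec_pretty_label; infer_instance

-- ===== CLAIM (what is proved, stated in full; the proofs are below) =====
def Claim_equal_pretty_label : Prop := ∀ (label : String), Dom_pretty_label label → Spec_pretty_label label (pretty_label label)

-- ===== LEMMAS AND PROOFS =====

-- split at single space, structurally (proved equal to PySem.Chars.splitOn · [' '])
def pvSplit : List Char → List (List Char)
  | [] => [[]]
  | c :: t => if c = ' ' then [] :: pvSplit t else (pvSplit t).modifyHead (c :: ·)

-- the per-character recursion both programs compute
def pvCore : List Char → Bool → List Char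
  | [], _ => []
  | c :: t, ls =>
    let c' := if ls then PySem.Chars.upperChar c else c
    c' :: pvCore t (if c' = ' ' then true else false)

-- B's per-word transform
def pvF (w : List Char) : List Char :=
  PySem.Chars.upper (PySem.Chars.slice w none (some 1)) ++ PySem.Chars.slice w (some 1) none

theorem pvSplit_ne_nil (t : List Char) : pvSplit t ≠ [] := by
  induction t with
  | nil => simp [pvSplit]
  | cons c t ih =>
    simp only [pvSplit]
    split
    · simp
    · cases h : pvSplit t with
      | nil => exact absurd h ih
      | cons w ws => simp

theorem pvGo_eq (fuel : Nat) : ∀ (l cur acc : _),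
    l.length < fuel →
    PySem.Chars.splitOn.go [' '] fuel l cur acc
      = acc.reverse ++ (pvSplit l).modifyHead (cur.reverse ++ ·) := by
  induction fuel with
  | zero => intro l cur acc h; omega
  | succ fuel ih =>
    intro l cur acc h
    cases l with
    | nil => simp [PySem.Chars.splitOn.go, pvSplit]
    | cons c rest =>
      by_cases hc : c = ' '
      · subst hc
        obtain ⟨w, ws, hw2⟩ := List.exists_cons_of_ne_nil (pvSplit_ne_nil rest)
        have hpre : List.isPrefixOf [' '] (' ' :: rest) = true := by
          simp [List.isPrefixOf]
        rw [PySem.Chars.splitOn.go, if_pos hpre]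
        simp only [List.length_cons] at h
        rw [ih _ _ _ (by simpa using h)]
        have hsp : pvSplit (' ' :: rest) = [] :: pvSplit rest := by simp [pvSplit]
        simp [hsp, hw2]
      · have hpre : List.isPrefixOf [' '] (c :: rest) = false := by
          simp [List.isPrefixOf]; exact fun h' => absurd h'.symm hc
        rw [PySem.Chars.splitOn.go, if_neg (by simp [hpre])]
        simp only [List.length_cons] at h
        rw [ih _ _ _ (by omega)]
        obtain ⟨w, ws, hw⟩ := List.exists_cons_of_ne_nil (pvSplit_ne_nil rest)
        simp [pvSplit, hc, hw]

theorem pvSplitOn_eq (l : List Char) : PySem.Chars.splitOn l [' '] = pvSplit l := by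
  unfold PySem.Chars.splitOn
  rw [pvGo_eq _ _ _ _ (by omega)]
  obtain ⟨w, ws, hw⟩ := List.exists_cons_of_ne_nil (pvSplit_ne_nil l)
  simp [hw]

theorem pvUpperChar_ne_space (c : Char) (h : c ≠ ' ') : PySem.Chars.upperChar c ≠ ' ' := by
  unfold PySem.Chars.upperChar PySem.Chars.islower
  split
  · rename_i hl
    simp only [Bool.and_eq_true, decide_eq_true_eq, Char.le_def] at hl
    have hb : 97 ≤ c.toNat ∧ c.toNat ≤ 122 := by
      unfold Char.toNat
      constructor
      · exact_mod_cast hl.1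
      · exact_mod_cast hl.2
    intro he
    have hv : Nat.isValidChar (c.toNat - 32) := by
      left; show c.toNat - 32 < 55296; omega
    have h2 := congrArg Char.toNat he
    rw [Char.toNat_ofNat, if_pos hv] at h2
    have : c.toNat - 32 = 32 := h2
    omega
  · exact h

theorem pvUpper_space : PySem.Chars.upperChar ' ' = ' ' := by decide

theorem pvF_nil : pvF [] = [] := by decide

theorem pvF_cons (c : Char) (t : List Char) : pvF (c :: t) = PySem.Chars.upperChar c :: t := by
  unfold pvF
  rw [PySem.Chars.slice_eq_listSlice, PySem.Chars.slice_eq_listSlice,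
    PySem.List.slice_to _ (by norm_num), PySem.List.slice_from _ (by norm_num)]
  simp [PySem.Chars.upper]

theorem pvJoin_cons (sep x : List Char) (xs : List (List Char)) :
    PySem.Chars.join sep (x :: xs)
      = x ++ if xs = [] then [] else sep ++ PySem.Chars.join sep xs := by
  cases xs <;> simp [PySem.Chars.join, List.intercalate]

theorem pvJoin_sp (cs : List Char) :
    (PySem.Chars.join [' '] ((pvSplit cs).map pvF) = pvCore cs true) ∧
    (∀ w ws, pvSplit cs = w :: ws →
      PySem.Chars.join [' '] (w :: ws.map pvF) = pvCore cs false) := by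
  induction cs with
  | nil =>
    constructor
    · decide
    · intro w ws hw
      simp only [pvSplit] at hw
      cases hw
      decide
  | cons c t ih =>
    obtain ⟨w, ws, hw⟩ := List.exists_cons_of_ne_nil (pvSplit_ne_nil t)
    by_cases hc : c = ' '
    · subst hc
      have hstep : PySem.Chars.join [' '] ((pvSplit t).map pvF) = pvCore t true := ih.1
      have hne : (pvSplit t).map pvF ≠ [] := by simp [pvSplit_ne_nil t]
      have hsp : pvSplit (' ' :: t) = [] :: pvSplit t := by simp [pvSplit]
      have hP : PySem.Chars.join [' '] ((pvSplit (' ' :: t)).map pvF) = pvCore (' ' :: t) true := by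
        rw [hsp]
        simp only [List.map_cons, pvF_nil]
        rw [pvJoin_cons, if_neg hne, hstep]
        simp [pvCore, pvUpper_space]
      refine ⟨hP, ?_⟩
      intro w' ws' hw'
      rw [hsp] at hw'
      cases hw'
      rw [pvJoin_cons, if_neg hne, hstep]
      simp [pvCore]
    · have hQ := ih.2 w ws hw
      have hsplit : pvSplit (c :: t) = (c :: w) :: ws.map id := by
        simp [pvSplit, hc, hw]
      have hflag : (if PySem.Chars.upperChar c = ' ' then true else false) = false := by
        simp [pvUpperChar_ne_space c hc]
      constructor
      · rw [hsplit]
        simp only [List.map_id, List.map_cons, pvF_cons]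
        rw [pvJoin_cons]
        rw [pvJoin_cons] at hQ
        rw [show pvCore (c :: t) true
            = PySem.Chars.upperChar c :: pvCore t false by simp [pvCore, hflag], ← hQ]
        cases ws <;> simp
      · intro w' ws' hw'
        rw [hsplit] at hw'
        simp only [List.map_id] at hw'
        cases hw'
        rw [pvJoin_cons]
        rw [pvJoin_cons] at hQ
        rw [show pvCore (c :: t) false = c :: pvCore t false by simp [pvCore, hc], ← hQ]
        cases ws <;> simp

theorem pvStep (acc : List Char) (ls : Bool) (c : Char) :
    pretty_label_step (acc, ls) c
      = (acc ++ [if ls then PySem.Chars.upperChar c else c],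
         if (if ls then PySem.Chars.upperChar c else c) = ' ' then true else false) := by
  cases ls <;> simp [pretty_label_step]

theorem pvFoldA (cs : List Char) : ∀ (acc : List Char) (ls : Bool),
    (cs.foldl pretty_label_step (acc, ls)).1 = acc ++ pvCore cs ls := by
  induction cs with
  | nil => intro acc ls; simp [pvCore]
  | cons c t ih =>
    intro acc ls
    rw [List.foldl_cons, pvStep, ih]
    simp [pvCore]

-- ===== VERDICT (by name: the statement is the Claim_ definition above) =====
theorem pretty_label_spec : Claim_equal_pretty_label := by
  intro label _
  unfold Spec_pretty_label pretty_label pretty_label_alt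
  simp only []
  rw [pvFoldA, pvSplitOn_eq]

  have hf : (fun w => PySem.Chars.upper (PySem.Chars.slice w none (some 1)) ++
      PySem.Chars.slice w (some 1) none) = pvF := rfl
  rw [hf, (pvJoin_sp _).1]
  simp
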